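-- pv_equiv track=rewrite | github.com/agenta2z/AgentFoundation | src/agent_foundation/common/inferencers/agentic_inferencers/external/metamate/common.py | needs_continuation
-- ===== SOURCE A (Python) =====
-- from typing import Any, List, Optional
--
-- _CONTINUATION_PHRASES: List[str] = [
--     "should i proceed",
--     "shall i proceed",
--     "would you like me to",
--     "do you want me to",
--     "use your own judgment",
--     "please proceed",
--     "let me know if",
--     "want me to research",
--     "want me to look into",
--     "narrow this",
--     "tell me your",
--     "tell me whether",
--     "tell me which",
--     "which one are you",
--     "are you most interested in",
--     "i can tailor",
--     "more actionable",
-- ]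
--
-- def needs_continuation(text: str) -> bool:
--     """Return True when the assistant's response is a clarification question.
--
--     Heuristics:
--     1. Short text (< 2000 chars) containing a known continuation phrase.
--     2. Short text (< 800 chars) ending with a question mark.
--
--     Args:
--         text: The assistant response text.
--
--     Returns:
--         Whether a continuation reply should be sent.
--     """
--     stripped = text.strip()
--     if not stripped:
--         return False
--     lower = stripped.lower()
--     for phrase in _CONTINUATION_PHRASES:
--         if phrase in lower and len(stripped) < 2000:
--             return True
--     if len(stripped) < 800 and stripped.endswith("?"):
--         return True
--     return False
-- ===== SOURCE B (Python) =====
-- from typing import List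
--
-- _CONTINUATION_PHRASES: List[str] = [
--     "should i proceed",
--     "shall i proceed",
--     "would you like me to",
--     "do you want me to",
--     "use your own judgment",
--     "please proceed",
--     "let me know if",
--     "want me to research",
--     "want me to look into",
--     "narrow this",
--     "tell me your",
--     "tell me whether",
--     "tell me which",
--     "which one are you",
--     "are you most interested in",
--     "i can tailor",
--     "more actionable",
-- ]
--
-- # Index the phrases by their first character once at module load; the text is then
-- # swept once left-to-right, probing only the phrases that can start at each position.
-- _BY_FIRST = {}
-- for _p in _CONTINUATION_PHRASES:
--     _BY_FIRST.setdefault(_p[0], []).append(_p)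
--
--
-- def needs_continuation(text: str) -> bool:
--     stripped = text.strip()
--     if not stripped:
--         return False
--     n = len(stripped)
--     if n < 2000:
--         lower = stripped.lower()
--         for i, ch in enumerate(lower):
--             for p in _BY_FIRST.get(ch, ()):
--                 if lower.startswith(p, i):
--                     return True
--     return n < 800 and stripped.endswith("?")
-- ===== Notes on version B (the rewrite author's own statement) =====
-- stated objective: alternative
-- what changed: Instead of running a separate substring scan of the text for each of the 17 phrases, B builds a first-character index of the phrases once at module load and sweeps the lowered text once left-to-right, probing at each position only the phrases that can start there, with the <2000 length gate hoisted out of the loop.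
import Mathlib
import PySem

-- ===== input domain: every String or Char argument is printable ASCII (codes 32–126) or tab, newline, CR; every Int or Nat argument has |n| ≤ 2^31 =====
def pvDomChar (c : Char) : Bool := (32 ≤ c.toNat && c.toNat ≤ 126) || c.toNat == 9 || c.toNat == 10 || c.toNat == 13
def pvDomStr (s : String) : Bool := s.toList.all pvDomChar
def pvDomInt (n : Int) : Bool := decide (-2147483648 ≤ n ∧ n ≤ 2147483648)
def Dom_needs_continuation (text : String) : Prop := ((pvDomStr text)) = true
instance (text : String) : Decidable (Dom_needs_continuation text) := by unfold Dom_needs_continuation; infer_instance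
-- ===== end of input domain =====

-- B replaces the per-phrase substring scans with one left-to-right sweep of the text
-- that probes, at each position, only the phrases indexed by their first character
-- (objective: alternative — a different traversal with a first-character index).

def CONTINUATION_PHRASES : List String :=
  ["should i proceed", "shall i proceed", "would you like me to", "do you want me to",
   "use your own judgment", "please proceed", "let me know if", "want me to research",
   "want me to look into", "narrow this", "tell me your", "tell me whether",
   "tell me which", "which one are you", "are you most interested in", "i can tailor",
   "more actionable"]

-- ===== PORT A =====
def needs_continuation (text : String) : Bool :=
  let stripped := PySem.Str.strip text
  if stripped.toList.isEmpty then false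
  else
    let lower := PySem.Str.lower stripped
    if CONTINUATION_PHRASES.any
        (fun p => PySem.Str.isIn p lower && decide (PySem.Str.len stripped < 2000)) then
      true
    else if decide (PySem.Str.len stripped < 800) && PySem.Str.endswith stripped "?" then
      true
    else false

-- ===== PORT B =====
-- module-load index: phrases grouped by first character ('_BY_FIRST' in Source B);
-- p[0] is total here since every phrase is nonempty, so headD is exact
def BY_FIRST : PySem.Dict Char (List String) :=
  CONTINUATION_PHRASES.foldl
    (fun d p =>
      PySem.Dict.insert d (p.toList.headD ' ')
        (PySem.Dict.getD d (p.toList.headD ' ') [] ++ [p]))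
    PySem.Dict.empty

-- the 'for i, ch in enumerate(lower)' sweep; lower.startswith(p, i) is a prefix
-- test on the i-th suffix, which is exactly this structural recursion
def scanB : List Char → Bool
  | [] => false
  | c :: cs =>
      (PySem.Dict.getD BY_FIRST c []).any
        (fun p => PySem.Chars.startswith (c :: cs) p.toList) || scanB cs

def needs_continuation_alt (text : String) : Bool :=
  let stripped := PySem.Str.strip text
  if stripped.toList.isEmpty then false
  else
    let n := PySem.Str.len stripped
    if decide (n < 2000) && scanB (PySem.Str.lower stripped).toList then true
    else decide (n < 800) && PySem.Str.endswith stripped "?"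

-- ===== PRECONDITION & SPEC =====
def Spec_needs_continuation (text : String) (out : Bool) : Prop := out = needs_continuation_alt text
instance (text : String) (out : Bool) : Decidable (Spec_needs_continuation text out) := by unfold Spec_needs_continuation; infer_instance

-- ===== CLAIM (what is proved, stated in full; the proofs are below) =====
def Claim_equal_needs_continuation : Prop := ∀ (text : String), Dom_needs_continuation text → Spec_needs_continuation text (needs_continuation text)

-- ===== LEMMAS AND PROOFS =====

-- the first-character index reads back as a filter of the phrase list
lemma byFirst_getD (c : Char) :
    PySem.Dict.getD BY_FIRST c []
      = CONTINUATION_PHRASES.filter (fun p => p.toList.head? == some c) := by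
  by_cases h1 : c = 's'; · subst h1; decide
  by_cases h2 : c = 'w'; · subst h2; decide
  by_cases h3 : c = 'd'; · subst h3; decide
  by_cases h4 : c = 'u'; · subst h4; decide
  by_cases h5 : c = 'p'; · subst h5; decide
  by_cases h6 : c = 'l'; · subst h6; decide
  by_cases h7 : c = 'n'; · subst h7; decide
  by_cases h8 : c = 't'; · subst h8; decide
  by_cases h9 : c = 'a'; · subst h9; decide
  by_cases h10 : c = 'i'; · subst h10; decide
  by_cases h11 : c = 'm'; · subst h11; decide
  simp [BY_FIRST, CONTINUATION_PHRASES, PySem.Dict.getD, PySem.Dict.get?, PySem.Dict.insert,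
        PySem.Dict.empty, Ne.symm h1, Ne.symm h2, Ne.symm h3, Ne.symm h4, Ne.symm h5,
        Ne.symm h6, Ne.symm h7, Ne.symm h8, Ne.symm h9, Ne.symm h10, Ne.symm h11]

lemma phrases_ne_nil : ∀ p ∈ CONTINUATION_PHRASES, p.toList ≠ [] := by decide

-- the sweep finds exactly the texts containing some phrase as an infix
lemma scan_iff (l : List Char) :
    scanB l = true ↔ ∃ p ∈ CONTINUATION_PHRASES, p.toList <:+: l := by
  induction l with
  | nil =>
      simp only [scanB]
      constructor
      · intro h; exact absurd h (by decide)
      · rintro ⟨p, hp, hinf⟩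
        exact absurd (List.eq_nil_of_infix_nil hinf) (phrases_ne_nil p hp)
  | cons c cs ih =>
      simp only [scanB, Bool.or_eq_true, ih, byFirst_getD, List.any_eq_true, List.mem_filter]
      constructor
      · rintro (⟨p, ⟨hp, _⟩, hs⟩ | ⟨p, hp, hinf⟩)
        · exact ⟨p, hp, ((PySem.Chars.startswith_iff _ _).1 hs).isInfix⟩
        · exact ⟨p, hp, List.infix_cons hinf⟩
      · rintro ⟨p, hp, hinf⟩
        rcases (List.infix_cons_iff).1 hinf with hpre | hinf'
        · left
          refine ⟨p, ⟨hp, ?_⟩, (PySem.Chars.startswith_iff _ _).2 hpre⟩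
          rcases hpre with ⟨t, ht⟩
          cases hh : p.toList with
          | nil => exact absurd hh (phrases_ne_nil p hp)
          | cons x xs => simp [hh] at ht ⊢; exact ht.1
        · exact Or.inr ⟨p, hp, hinf'⟩

-- ===== VERDICT (by name: the statement is the Claim_ definition above) =====
theorem needs_continuation_spec : Claim_equal_needs_continuation := by
  intro text _
  unfold Spec_needs_continuation needs_continuation needs_continuation_alt
  simp
  rw [Bool.eq_iff_iff]
  simp only [Bool.and_eq_true, Bool.or_eq_true, Bool.not_eq_true', decide_eq_true_eq,
             scan_iff, PySem.Chars.isIn_iff_infix]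
  have h : ∀ (Q : String → Prop) (c : Prop), (∃ x ∈ CONTINUATION_PHRASES, Q x ∧ c) ↔ (c ∧ ∃ x ∈ CONTINUATION_PHRASES, Q x) := by
    intro Q c
    constructor
    · rintro ⟨x, hx, hq, hc⟩; exact ⟨hc, x, hx, hq⟩
    · rintro ⟨hc, x, hx, hq⟩; exact ⟨x, hx, hq, hc⟩
  rw [h]
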